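-- pv_equiv track=rewrite | github.com/BeAStriver/Federated-Learning-with-Domain-Shift-Eraser | federated/server.py | _build_layer_groups
-- ===== SOURCE A (Python) =====
-- from typing import List, Dict, Any
--
-- def _build_layer_groups(param_names: List[str]) -> List[List[str]]:
--     groups = {}
--     for name in param_names:
--         # module prefix = everything before the last '.'
--         if '.' in name:
--             prefix = name.rsplit('.', 1)[0]
--         else:
--             prefix = name
--         groups.setdefault(prefix, []).append(name)
--     # return list of groups (each group is list of full param names)
--     return list(groups.values())
-- ===== SOURCE B (Python) =====
-- def _build_layer_groups(param_names):
--     def prefix_of(name):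
--         return name.rsplit('.', 1)[0] if '.' in name else name
--     # pass 1: distinct prefixes in first-appearance order
--     seen = set()
--     prefixes = []
--     for n in param_names:
--         p = prefix_of(n)
--         if p not in seen:
--             seen.add(p)
--             prefixes.append(p)
--     # pass 2: one full re-scan of param_names per prefix
--     return [[n for n in param_names if prefix_of(n) == p] for p in prefixes]
-- ===== Notes on version B (the rewrite author's own statement) =====
-- stated objective: alternative
-- what changed: Replaces the single-pass setdefault dict-of-lists grouping with an index-first repeated-scan decomposition: first collect the distinct prefixes in first-appearance order, then build each group by filtering the whole name list for that prefix (O(n*k) scans instead of one pass with a dict).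
import Mathlib
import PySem

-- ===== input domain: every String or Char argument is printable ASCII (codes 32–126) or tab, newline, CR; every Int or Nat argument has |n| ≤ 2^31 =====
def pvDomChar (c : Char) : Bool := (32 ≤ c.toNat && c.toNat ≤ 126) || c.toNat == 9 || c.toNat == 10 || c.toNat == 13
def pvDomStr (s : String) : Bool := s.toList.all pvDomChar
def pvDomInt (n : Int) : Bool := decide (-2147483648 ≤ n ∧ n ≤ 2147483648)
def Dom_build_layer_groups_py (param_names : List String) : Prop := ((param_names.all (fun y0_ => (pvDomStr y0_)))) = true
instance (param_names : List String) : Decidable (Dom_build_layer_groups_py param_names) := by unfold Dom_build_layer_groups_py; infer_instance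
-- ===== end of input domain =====

-- B replaces A's single-pass setdefault dict-of-lists grouping by an index-first,
-- repeated-scan decomposition: collect distinct prefixes first, then filter the name
-- list once per prefix (alternative decomposition, not claimed faster).

-- shared helper: the module prefix of a parameter name.
-- name.rsplit('.', 1)[0] with '.' in name is exactly name[:name.rfind('.')]  (slice up to the last '.')
def pyPrefix (name : String) : String :=
  if PySem.Str.isIn "." name then
    PySem.Str.slice name none (some (PySem.Str.rfind name "."))
  else
    name

-- ===== PORT A =====
-- groups.setdefault(prefix, []).append(name) is exactly d.modify prefix [] (· ++ [name])
def build_layer_groups_py (param_names : List String) : List (List String) :=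
  (param_names.foldl
      (fun groups name => groups.modify (pyPrefix name) [] (· ++ [name]))
      (PySem.Dict.empty : PySem.Dict String (List String))).values

-- ===== PORT B =====
-- pass 1 (seen-set + append of unseen prefixes) is exactly PySem.Set.ofList of the prefixes;
-- pass 2 is the per-prefix filtering comprehension
def build_layer_groups_py_alt (param_names : List String) : List (List String) :=
  let prefixes := PySem.Set.ofList (param_names.map pyPrefix)
  prefixes.map (fun p => param_names.filter (fun n => pyPrefix n == p))

-- ===== PRECONDITION & SPEC =====
def Spec_build_layer_groups_py (param_names : List String) (out : List (List String)) : Prop := out = build_layer_groups_py_alt param_names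
instance (param_names : List String) (out : List (List String)) : Decidable (Spec_build_layer_groups_py param_names out) := by unfold Spec_build_layer_groups_py; infer_instance

-- ===== CLAIM (what is proved, stated in full; the proofs are below) =====
def Claim_equal_build_layer_groups_py : Prop := ∀ (param_names : List String), Dom_build_layer_groups_py param_names → Spec_build_layer_groups_py param_names (build_layer_groups_py param_names)

-- ===== LEMMAS AND PROOFS =====

-- A's dict loop is shown to produce exactly B's map-of-filters form.

-- A side: the grouping loop, rewritten over (prefix, name) pairs
def pairLoop (l : List String) : PySem.Dict String (List String) :=
  (l.map (fun n => (pyPrefix n, n))).foldl (fun d p => d.modify p.1 [] (· ++ [p.2])) PySem.Dict.empty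

lemma loop_eq_pairLoop (l : List String) :
    l.foldl (fun g n => g.modify (pyPrefix n) [] (· ++ [n]))
      (PySem.Dict.empty : PySem.Dict String (List String)) = pairLoop l := by
  simp [pairLoop, List.foldl_map]

lemma keys_pairLoop (l : List String) :
    (pairLoop l).keys = PySem.List.dedup (l.map pyPrefix) := by
  unfold pairLoop
  rw [PySem.Dict.keys_foldl_modify_key]
  simp [PySem.Set.update, PySem.Set.ofList_eq_foldl, PySem.Dict.keys_empty, List.map_map,
    Function.comp_def]

lemma nodup_keys_pairLoop (l : List String) : (pairLoop l).keys.Nodup := by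
  unfold pairLoop
  exact PySem.Dict.nodup_keys_foldl_modify_key (l.map (fun n => (pyPrefix n, n)))
    (fun p => p.1) [] (fun _ p v => v ++ [p.2]) PySem.Dict.empty PySem.Dict.nodup_keys_empty

lemma getD_pairLoop (l : List String) (k : String) :
    (pairLoop l).getD k [] = l.filter (fun n => pyPrefix n == k) := by
  unfold pairLoop
  rw [PySem.Dict.getD_foldl_modify_append]
  simp [List.filter_map, Function.comp_def]

lemma portA_eq_map_filter (l : List String) :
    build_layer_groups_py l
      = (PySem.Set.ofList (l.map pyPrefix)).map
          (fun p => l.filter (fun n => pyPrefix n == p)) := by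
  unfold build_layer_groups_py
  rw [loop_eq_pairLoop, PySem.Dict.values_eq_map_keys _ (nodup_keys_pairLoop l) [],
    keys_pairLoop]
  simp only [getD_pairLoop, PySem.List.dedup_eq_ofList]

-- ===== VERDICT (by name: the statement is the Claim_ definition above) =====
theorem build_layer_groups_py_spec : Claim_equal_build_layer_groups_py := by
  intro l _
  unfold Spec_build_layer_groups_py
  rw [portA_eq_map_filter]
  rfl
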